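-- pv_equiv track=rewrite | github.com/banana-galaxy/challenges | challenge10(timer)/solutions/TrespassingToilet.py | lateRide
-- ===== SOURCE A (Python) =====
-- def lateRide(time):
--     hours = int(time / 60)
--     minutes = time - (60 * hours)
--
--     hours_array = list(str(hours))
--     minutes_array = list(str(minutes))
--
--     count = 0
--     for i in range(len(hours_array)):
--         count += int(hours_array[i])
--
--     for i in range(len(minutes_array)):
--         count += int(minutes_array[i])
--
--     return count
-- ===== SOURCE B (Python) =====
-- def lateRide(time):
--     hours = int(time / 60)
--     minutes = time - (60 * hours)
--     count = 0
--     n = hours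
--     while n > 0:
--         count += n % 10
--         n //= 10
--     n = minutes
--     while n > 0:
--         count += n % 10
--         n //= 10
--     return count
-- ===== Notes on version B (the rewrite author's own statement) =====
-- stated objective: alternative
-- what changed: B extracts and sums digits arithmetically with while-loops (n % 10, n //= 10) instead of A's str()/list() conversion and indexed loops over character arrays.
import Mathlib
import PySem

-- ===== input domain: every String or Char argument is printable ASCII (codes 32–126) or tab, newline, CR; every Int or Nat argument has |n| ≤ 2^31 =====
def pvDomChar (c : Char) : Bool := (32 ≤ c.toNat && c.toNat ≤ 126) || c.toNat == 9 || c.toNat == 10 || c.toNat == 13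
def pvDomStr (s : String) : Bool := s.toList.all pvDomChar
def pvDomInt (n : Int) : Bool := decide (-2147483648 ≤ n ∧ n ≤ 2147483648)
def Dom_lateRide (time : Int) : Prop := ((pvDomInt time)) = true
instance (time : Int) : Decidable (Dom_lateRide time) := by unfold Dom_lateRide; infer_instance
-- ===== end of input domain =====

-- B sums the digits of hours and minutes by arithmetic (% 10, // 10) instead of A's
-- string/character-list conversion; same cost, genuinely different digit traversal.

-- ===== PORT A =====
-- int(ch) on a single character: PySem.Int.ofChars? [ch]; under Pre_ the character is
-- always a decimal digit, so the .getD 0 default is never consulted.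
def lateRide (time : Int) : Int :=
  let hours := PySem.Int.truncdiv time 60
  let minutes := time - 60 * hours
  let hoursArray := PySem.Int.toChars hours
  let minutesArray := PySem.Int.toChars minutes
  let count : Int := 0
  let count := (PySem.List.pyRange 0 (PySem.List.len hoursArray) 1).foldl
    (fun c i => c + (PySem.Int.ofChars? [PySem.List.pyGetD hoursArray i ' ']).getD 0) count
  let count := (PySem.List.pyRange 0 (PySem.List.len minutesArray) 1).foldl
    (fun c i => c + (PySem.Int.ofChars? [PySem.List.pyGetD minutesArray i ' ']).getD 0) count
  count

-- ===== PORT B =====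
-- the 'while n > 0: count += n % 10; n //= 10' loop of Source B
def lateRideLoop (n : Int) (count : Int) : Int :=
  if h : 0 < n then
    lateRideLoop (PySem.Int.floordiv n 10) (count + PySem.Int.mod n 10)
  else count
termination_by n.toNat
decreasing_by
  have h10 : PySem.Int.floordiv n 10 = n / 10 := by
    simp [PySem.Int.floordiv, Int.fdiv_eq_ediv_of_nonneg _ (by norm_num : (0:Int) ≤ 10)]
  rw [h10]; omega

def lateRide_alt (time : Int) : Int :=
  let hours := PySem.Int.truncdiv time 60
  let minutes := time - 60 * hours
  let count : Int := 0
  let count := lateRideLoop hours count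
  let count := lateRideLoop minutes count
  count

-- ===== PRECONDITION & SPEC =====
-- Pre_ excludes negative time, where A raises ValueError: str(hours) or str(minutes)
-- then contains '-', and int('-') fails.
def Pre_lateRide (time : Int) : Prop := 0 ≤ time
instance (time : Int) : Decidable (Pre_lateRide time) := by unfold Pre_lateRide; infer_instance
def pvWitness_lateRide : Int := (125)

def Spec_lateRide (time : Int) (out : Int) : Prop := out = lateRide_alt time
instance (time : Int) (out : Int) : Decidable (Spec_lateRide time out) := by unfold Spec_lateRide; infer_instance

-- ===== CLAIM (what is proved, stated in full; the proofs are below) =====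
def Claim_equal_lateRide : Prop := ∀ (time : Int), Dom_lateRide time → Pre_lateRide time → Spec_lateRide time (lateRide time)

-- ===== LEMMAS AND PROOFS =====

-- value read by A from one character (int(ch))
def pvCharVal (c : Char) : Int := (PySem.Int.ofChars? [c]).getD 0

-- mathematical digit sum of a natural number
def pvDigitSum (n : Nat) : Int :=
  if h : n = 0 then 0 else (n % 10 : Nat) + pvDigitSum (n / 10)
decreasing_by exact Nat.div_lt_self (Nat.pos_of_ne_zero h) (by norm_num)

theorem pvCharVal_digitChar (d : Nat) (hd : d < 10) :
    pvCharVal (Nat.digitChar d) = (d : Int) := by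
  interval_cases d <;> decide

theorem pvDigitSum_zero : pvDigitSum 0 = 0 := by
  rw [pvDigitSum]; simp

theorem pvDigitSum_pos (n : Nat) (h : n ≠ 0) :
    pvDigitSum n = ((n % 10 : Nat) : Int) + pvDigitSum (n / 10) := by
  conv_lhs => rw [pvDigitSum]
  simp [h]

theorem pvDigitSum_small (n : Nat) (h : n / 10 = 0) :
    pvDigitSum n = ((n % 10 : Nat) : Int) := by
  rcases eq_or_ne n 0 with h0 | h0
  · subst h0; simp [pvDigitSum_zero]
  · rw [pvDigitSum_pos n h0, h, pvDigitSum_zero, add_zero]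

theorem foldl_add_charVal (cs : List Char) (init : Int) :
    cs.foldl (fun c ch => c + (PySem.Int.ofChars? [ch]).getD 0) init
      = init + (cs.map pvCharVal).sum := by
  induction cs generalizing init with
  | nil => simp
  | cons c cs ih => simp [List.foldl_cons, ih, pvCharVal, add_assoc]

theorem sum_toDigitsCore (fuel n : Nat) (acc : List Char) (hf : n < fuel) :
    ((Nat.toDigitsCore 10 fuel n acc).map pvCharVal).sum
      = pvDigitSum n + ((acc.map pvCharVal).sum) := by
  induction fuel generalizing n acc with
  | zero => omega
  | succ f ih =>
    rw [Nat.toDigitsCore]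
    by_cases h : n / 10 = 0
    · rw [if_pos h, pvDigitSum_small n h]
      simp [pvCharVal_digitChar (n % 10) (Nat.mod_lt _ (by norm_num))]
    · rw [if_neg h, ih (n / 10) _ (by omega)]
      rw [pvDigitSum_pos n (by omega)]
      simp [pvCharVal_digitChar (n % 10) (Nat.mod_lt _ (by norm_num))]
      ring

theorem sum_toChars (m : Int) (hm : 0 ≤ m) :
    ((PySem.Int.toChars m).map pvCharVal).sum = pvDigitSum m.toNat := by
  have : ¬ m < 0 := by omega
  simp only [PySem.Int.toChars, if_neg this, Nat.toDigits]
  rw [sum_toDigitsCore (m.toNat + 1) m.toNat [] (Nat.lt_succ_self _)]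
  simp

theorem fold_idx (xs : List Char) (init : Int) :
    (PySem.List.pyRange 0 (PySem.List.len xs) 1).foldl
        (fun c i => c + (PySem.Int.ofChars? [PySem.List.pyGetD xs i ' ']).getD 0) init
      = init + (xs.map pvCharVal).sum := by
  rw [PySem.List.foldl_pyRange_zero_pyGetD xs ' '
      (fun c ch => c + (PySem.Int.ofChars? [ch]).getD 0) init]
  exact foldl_add_charVal xs init

theorem lateRideLoop_eq (n : Nat) : ∀ (count : Int),
    lateRideLoop (n : Int) count = count + pvDigitSum n := by
  induction n using Nat.strong_induction_on with
  | _ n ih =>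
    intro count
    rw [lateRideLoop]
    by_cases h : 0 < (n : Int)
    · have hf : PySem.Int.floordiv (n : Int) 10 = ((n / 10 : Nat) : Int) := by
        simp [PySem.Int.floordiv, Int.fdiv_eq_ediv_of_nonneg _ (by norm_num : (0:Int) ≤ 10)]
      have hmod : PySem.Int.mod (n : Int) 10 = ((n % 10 : Nat) : Int) := by
        simp [PySem.Int.mod, Int.fmod_eq_emod_of_nonneg _ (by norm_num : (0:Int) ≤ 10)]
      simp only [dif_pos h, hf, hmod]
      rw [ih (n / 10) (Nat.div_lt_self (by omega) (by norm_num))]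
      rw [pvDigitSum_pos n (by omega)]
      ring
    · have hn : n = 0 := by omega
      subst hn
      simp [pvDigitSum_zero]

theorem lateRideLoop_eq' (m : Int) (hm : 0 ≤ m) (count : Int) :
    lateRideLoop m count = count + pvDigitSum m.toNat := by
  have hmn : m = (m.toNat : Int) := by omega
  conv_lhs => rw [hmn]
  rw [lateRideLoop_eq]

-- ===== VERDICT (by name: the statement is the Claim_ definition above) =====
theorem lateRide_spec : Claim_equal_lateRide := by
  intro time _hdom hpre
  unfold Spec_lateRide lateRide lateRide_alt
  dsimp only
  have hpre' : (0 : Int) ≤ time := hpre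
  have hhq : (0 : Int) ≤ PySem.Int.truncdiv time 60 := by
    simp [PySem.Int.truncdiv]
    exact Int.tdiv_nonneg hpre' (by norm_num)
  have hmin : (0 : Int) ≤ time - 60 * PySem.Int.truncdiv time 60 := by
    simp [PySem.Int.truncdiv]
    have := Int.emod_nonneg time (b := 60) (by norm_num)
    have htd : time.tdiv 60 = time / 60 := Int.tdiv_eq_ediv_of_nonneg hpre'
    rw [htd]
    omega
  rw [fold_idx, fold_idx]
  rw [sum_toChars _ hhq, sum_toChars _ hmin]
  rw [lateRideLoop_eq' _ hhq, lateRideLoop_eq' _ hmin]
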